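-- pv_equiv track=rewrite | github.com/vxmao87/Python-Practice | 4-lists/exercises2.py | price_is_right
-- ===== SOURCE A (Python) =====
-- def price_is_right(bids, price):
--     prices = []
--     price_dif = []
--     for i in range(len(bids)):
--         if bids[i] <= price:
--             prices.append(bids[i])
--             price_dif.append(price - bids[i])
--     if len(price_dif) == 0:
--         return -1
--     else:
--         return prices[price_dif.index(min(price_dif))]
-- ===== SOURCE B (Python) =====
-- def price_is_right(bids, price):
--     best = None
--     for b in bids:
--         if b <= price and (best is None or b > best):
--             best = b
--     return -1 if best is None else best
-- ===== Notes on version B (the rewrite author's own statement) =====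
-- stated objective: simpler
-- what changed: Replaced the two auxiliary lists plus min()+index()+re-index lookup by a single running-best scan that keeps the first largest qualifying bid (strict > preserves A's first-occurrence tie behaviour).
import Mathlib
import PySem

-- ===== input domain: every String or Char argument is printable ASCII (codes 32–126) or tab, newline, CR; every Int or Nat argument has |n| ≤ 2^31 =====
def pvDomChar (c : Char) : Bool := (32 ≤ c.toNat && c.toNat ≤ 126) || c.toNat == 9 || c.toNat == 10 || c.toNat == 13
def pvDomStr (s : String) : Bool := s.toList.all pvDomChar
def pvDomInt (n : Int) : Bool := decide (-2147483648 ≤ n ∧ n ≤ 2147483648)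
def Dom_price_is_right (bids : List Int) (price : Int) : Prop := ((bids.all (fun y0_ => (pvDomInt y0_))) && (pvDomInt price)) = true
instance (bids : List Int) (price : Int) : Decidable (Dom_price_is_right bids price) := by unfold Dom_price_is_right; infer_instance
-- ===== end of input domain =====

-- B replaces A's two parallel lists + min()/index()/re-index by a single running-best scan (objective: simpler, one pass, O(1) extra space).

-- ===== PORT A =====
def price_is_right (bids : List Int) (price : Int) : Int :=
  -- for i in range(len(bids)): if bids[i] <= price: prices.append(bids[i]); price_dif.append(price - bids[i])
  let st := (PySem.List.pyRange 0 (bids.length : Int) 1).foldl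
    (fun (st : List Int × List Int) i =>
      let b := PySem.List.pyGetD bids i 0    -- bids[i]; i ranges over range(len(bids)), always in range
      if b ≤ price then (st.1 ++ [b], st.2 ++ [price - b]) else st)
    ([], [])
  if st.2.length = 0 then -1
  else
    match PySem.List.min? st.2 (fun x => x) with     -- min(price_dif); some since price_dif ≠ []
    | none => -1   -- unreachable
    | some m =>
      match PySem.List.index? st.2 m with            -- price_dif.index(min(...)); some since m ∈ price_dif
      | none => -1 -- unreachable
      | some j => PySem.List.pyGetD st.1 (j : Int) 0 -- prices[j]; j < len(prices), always in range

-- ===== PORT B =====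
def price_is_right_alt (bids : List Int) (price : Int) : Int :=
  let best := bids.foldl
    (fun (best : Option Int) b =>
      if b ≤ price && (match best with | none => true | some m => decide (m < b)) then some b
      else best)
    (none : Option Int)
  match best with
  | none => -1
  | some m => m

-- ===== PRECONDITION & SPEC =====
def Spec_price_is_right (bids : List Int) (price : Int) (out : Int) : Prop := out = price_is_right_alt bids price
instance (bids : List Int) (price : Int) (out : Int) : Decidable (Spec_price_is_right bids price out) := by unfold Spec_price_is_right; infer_instance

-- ===== CLAIM (what is proved, stated in full; the proofs are below) =====
def Claim_equal_price_is_right : Prop := ∀ (bids : List Int) (price : Int), Dom_price_is_right bids price → Spec_price_is_right bids price (price_is_right bids price)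

-- ===== LEMMAS AND PROOFS =====

-- A's loop builds (acc ++ filtered bids, acc ++ their differences)
theorem foldA_filter (price : Int) (bids : List Int) (p q : List Int) :
    bids.foldl
      (fun (st : List Int × List Int) b =>
        if b ≤ price then (st.1 ++ [b], st.2 ++ [price - b]) else st) (p, q)
    = (p ++ bids.filter (fun b => decide (b ≤ price)),
       q ++ (bids.filter (fun b => decide (b ≤ price))).map (fun b => price - b)) := by
  induction bids generalizing p q with
  | nil => simp
  | cons b t ih =>
    by_cases h : b ≤ price <;> simp [h, ih]

-- B's fold over bids = the pure keep-first-max fold over the qualifying bids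
theorem foldB_filter (price : Int) (bids : List Int) (init : Option Int) :
    bids.foldl
      (fun (best : Option Int) b =>
        if b ≤ price && (match best with | none => true | some m => decide (m < b)) then some b
        else best) init
    = (bids.filter (fun b => decide (b ≤ price))).foldl
        (fun (best : Option Int) b =>
          match best with
          | none => some b
          | some m => if m < b then some b else some m) init := by
  induction bids generalizing init with
  | nil => rfl
  | cons b t ih =>
    by_cases h : b ≤ price
    · have hstep : (if b ≤ price && (match init with | none => true | some m => decide (m < b))
          then some b else init)
          = (match init with
             | none => some b
             | some m => if m < b then some b else some m) := by
        cases init with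
        | none => simp [h]
        | some m => by_cases hm : m < b <;> simp [h, hm]
      rw [List.foldl_cons, hstep, List.filter_cons]
      simp only [h, decide_true, if_true, List.foldl_cons]
      exact ih _
    · have hstep : (if b ≤ price && (match init with | none => true | some m => decide (m < b))
          then some b else init) = init := by simp [h]
      rw [List.foldl_cons, hstep, List.filter_cons]
      simp only [h, decide_false, Bool.false_eq_true, if_false]
      exact ih init

theorem foldB_some (t : List Int) (a : Int) :
    t.foldl
      (fun (best : Option Int) b =>
        match best with
        | none => some b
        | some m => if m < b then some b else some m) (some a)
    = some (t.foldl max a) := by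
  induction t generalizing a with
  | nil => rfl
  | cons b t ih =>
    have h1 : (if a < b then some b else some a) = some (max a b) := by
      by_cases hab : a < b
      · simp [hab, max_eq_right hab.le]
      · simp [hab, max_eq_left (not_lt.mp hab)]
    simp only [List.foldl_cons, h1, ih]

-- running min over the differences = price minus the running max over the bids
theorem foldMin_sub (price : Int) (t : List Int) (a : Int) :
    (t.map (fun b => price - b)).foldl min (price - a) = price - t.foldl max a := by
  induction t generalizing a with
  | nil => rfl
  | cons b t ih =>
    have key : min (price - a) (price - b) = price - max a b := by
      rw [min_def, max_def]; split_ifs <;> omega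
    rw [List.map_cons, List.foldl_cons, List.foldl_cons, key]
    exact ih (max a b)

-- first-occurrence index in the mapped list equals the one in the original (b ↦ price - b is injective)
theorem index?_map_sub (price : Int) (L : List Int) (M : Int) :
    PySem.List.index? (L.map (fun b => price - b)) (price - M) = PySem.List.index? L M := by
  induction L with
  | nil => rfl
  | cons x t ih =>
    by_cases h : x = M
    · subst h
      rw [List.map_cons, PySem.List.index?_cons_self, PySem.List.index?_cons_self]
    · rw [List.map_cons,
          PySem.List.index?_cons_of_ne _ (show price - x ≠ price - M by omega),
          PySem.List.index?_cons_of_ne _ h, ih]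

theorem price_is_right_eq (bids : List Int) (price : Int) :
    price_is_right bids price = price_is_right_alt bids price := by
  unfold price_is_right price_is_right_alt
  rw [PySem.List.foldl_pyRange_zero_pyGetD' bids 0
        (fun (st : List Int × List Int) b =>
          if b ≤ price then (st.1 ++ [b], st.2 ++ [price - b]) else st) ([], []),
      foldA_filter, foldB_filter]
  set L := bids.filter (fun b => decide (b ≤ price)) with hL
  simp only [List.nil_append]
  cases hcase : L with
  | nil => simp
  | cons a t =>
    set M := t.foldl max a with hM
    have hBfold : (a :: t).foldl
        (fun (best : Option Int) b =>
          match best with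
          | none => some b
          | some m => if m < b then some b else some m) none = some M := by
      rw [List.foldl_cons]
      exact foldB_some t a
    have hminv : PySem.List.min? ((a :: t).map (fun b => price - b)) (fun x => x)
        = some (price - M) := by
      rw [List.map_cons, PySem.List.min?_id_cons, foldMin_sub]
    have hMmem : M ∈ a :: t := by
      have := PySem.List.max?_id_cons (x := a) (t := t)
      exact PySem.List.max?_mem this
    have hidx : (PySem.List.index? (a :: t) M).isSome := by
      rw [PySem.List.index?_isSome_iff]; exact hMmem
    cases hj : PySem.List.index? (a :: t) M with
    | none => rw [hj] at hidx; simp at hidx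
    | some j =>
      have hidx2 : PySem.List.index? ((a :: t).map (fun b => price - b)) (price - M)
          = some j := by rw [index?_map_sub, hj]
      obtain ⟨hjlt, hget, _⟩ := PySem.List.getElem_of_index?_eq_some hj
      simp only [List.length_map, List.length_cons, Nat.succ_ne_zero, if_false,
        hminv, hidx2, hBfold]
      rw [PySem.List.pyGetD_natCast]
      simp [List.getD_eq_getElem?_getD, List.getElem?_eq_getElem hjlt, hget]

-- ===== VERDICT (by name: the statement is the Claim_ definition above) =====
theorem price_is_right_spec : Claim_equal_price_is_right := by
  intro bids price _
  unfold Spec_price_is_right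
  exact price_is_right_eq bids price
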